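-- pv_equiv track=rewrite | github.com/ivanipenburg/nonogram | game/playerfield.py | get_connected_blocks
-- ===== SOURCE A (Python) =====
-- def get_connected_blocks(values: list[str]) -> list[int]:
--     '''Get the number of connected blocks in a row or column'''
--     blocks = []
--     current_block = 0
--     for value in values:
--         if value == "x":
--             current_block += 1
--         else:
--             if current_block > 0:
--                 blocks.append(current_block)
--             current_block = 0
--     if current_block > 0:
--         blocks.append(current_block)
--     return blocks
-- ===== SOURCE B (Python) =====
-- def get_connected_blocks(values: list[str]) -> list[int]:
--     '''Get the number of connected blocks in a row or column'''
--     n = len(values)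
--     # boundary detection by index: block starts and block ends, then pair them up
--     starts = [i for i in range(n)
--               if values[i] == "x" and (i == 0 or values[i - 1] != "x")]
--     ends = [i for i in range(n)
--             if values[i] == "x" and (i == n - 1 or values[i + 1] != "x")]
--     return [e - s + 1 for s, e in zip(starts, ends)]
-- ===== Notes on version B (the rewrite author's own statement) =====
-- stated objective: alternative
-- what changed: Replaced the single-pass run-length state machine with index-based boundary detection: one pass collects block-start indices, another collects block-end indices, and block lengths are end-start+1 over their pairwise zip.
import Mathlib
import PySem

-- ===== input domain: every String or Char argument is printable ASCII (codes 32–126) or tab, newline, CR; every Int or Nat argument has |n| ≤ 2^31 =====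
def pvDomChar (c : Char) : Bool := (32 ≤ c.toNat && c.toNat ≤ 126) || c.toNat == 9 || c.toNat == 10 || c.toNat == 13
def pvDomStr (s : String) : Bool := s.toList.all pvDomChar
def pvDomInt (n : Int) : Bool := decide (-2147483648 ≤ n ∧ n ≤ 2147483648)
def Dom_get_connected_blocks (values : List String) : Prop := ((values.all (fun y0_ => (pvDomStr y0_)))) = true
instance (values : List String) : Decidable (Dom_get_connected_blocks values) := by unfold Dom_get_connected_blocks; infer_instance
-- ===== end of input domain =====

-- B replaces A's run-length state machine by index-based boundary detection (block starts, block ends, pairwise e-s+1); alternative algorithm, same cost.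

-- ===== PORT A =====
-- A's loop: state (blocks, current_block); post-loop flush of a pending block.
def get_connected_blocks (values : List String) : List Int :=
  let st := values.foldl
    (fun (p : List Int × Int) value =>
      if value == "x" then (p.1, p.2 + 1)
      else if p.2 > 0 then (p.1 ++ [p.2], 0) else (p.1, 0))
    ([], 0)
  if st.2 > 0 then st.1 ++ [st.2] else st.1

-- ===== PORT B =====
-- two filtered index passes (starts, ends) then zip; indices from range(n) are in range,
-- so Python's values[i] / values[i-1] / values[i+1] are ported exactly by getD (the i-1
-- access is only reached when i ≠ 0, the i+1 access only when i ≠ n-1, as in Python's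
-- short-circuit `or`).
def get_connected_blocks_alt (values : List String) : List Int :=
  List.zipWith (fun (s e : Nat) => (e : Int) - (s : Int) + 1)
    ((List.range values.length).filter (fun (i : Nat) =>
      values.getD i "" == "x" && (decide (i = 0) || !(values.getD (i - 1) "" == "x"))))
    ((List.range values.length).filter (fun (i : Nat) =>
      values.getD i "" == "x" && (decide (i = values.length - 1) || !(values.getD (i + 1) "" == "x"))))

-- ===== PRECONDITION & SPEC =====
def Spec_get_connected_blocks (values : List String) (out : List Int) : Prop := out = get_connected_blocks_alt values
instance (values : List String) (out : List Int) : Decidable (Spec_get_connected_blocks values out) := by unfold Spec_get_connected_blocks; infer_instance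

-- ===== CLAIM (what is proved, stated in full; the proofs are below) =====
def Claim_equal_get_connected_blocks : Prop := ∀ (values : List String), Dom_get_connected_blocks values → Spec_get_connected_blocks values (get_connected_blocks values)

-- ===== LEMMAS AND PROOFS =====

-- Common reference specification: the lengths of the maximal "x"-runs, front to back.
def gcbSpec : List String → List Int
  | [] => []
  | v :: rest =>
    if v == "x" then
      (1 + ((rest.takeWhile (fun w => w == "x")).length : Int))
        :: gcbSpec (rest.dropWhile (fun w => w == "x"))
    else gcbSpec rest
termination_by l => l.length
decreasing_by
  · exact Nat.lt_succ_of_le (List.length_dropWhile_le _ _)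
  · exact Nat.lt_succ_self _

---------------- A side ----------------

def gcbStepA (p : List Int × Int) (value : String) : List Int × Int :=
  if value == "x" then (p.1, p.2 + 1)
  else if p.2 > 0 then (p.1 ++ [p.2], 0) else (p.1, 0)

def gcbFlushA (st : List Int × Int) : List Int :=
  if st.2 > 0 then st.1 ++ [st.2] else st.1

-- Abstraction of A's loop: result of the remaining fold + flush, given current counter.
def gcbRuns : Int → List String → List Int
  | cur, [] => if cur > 0 then [cur] else []
  | cur, v :: rest =>
    if v == "x" then gcbRuns (cur + 1) rest
    else (if cur > 0 then [cur] else []) ++ gcbRuns 0 rest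

lemma get_connected_blocks_eq (values : List String) :
    get_connected_blocks values = gcbFlushA (values.foldl gcbStepA ([], 0)) := rfl

lemma gcbRuns_foldl (l : List String) : ∀ (acc : List Int) (cur : Int),
    gcbFlushA (l.foldl gcbStepA (acc, cur)) = acc ++ gcbRuns cur l := by
  induction l with
  | nil =>
    intro acc cur
    simp only [List.foldl_nil, gcbFlushA, gcbRuns]
    split <;> simp
  | cons v rest ih =>
    intro acc cur
    simp only [List.foldl_cons, gcbRuns]
    by_cases hv : v == "x"
    · rw [show gcbStepA (acc, cur) v = (acc, cur + 1) by simp [gcbStepA, hv], ih, if_pos hv]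
    · rw [if_neg hv]
      by_cases hc : cur > 0
      · rw [show gcbStepA (acc, cur) v = (acc ++ [cur], 0) by simp [gcbStepA, hv, hc],
          ih, if_pos hc]
        simp
      · rw [show gcbStepA (acc, cur) v = (acc, 0) by simp [gcbStepA, hv, hc], ih, if_neg hc]
        simp

lemma gcbRuns_pos (l : List String) : ∀ (cur : Int), 0 < cur →
    gcbRuns cur l = (cur + ((l.takeWhile (fun w => w == "x")).length : Int))
      :: gcbRuns 0 (l.dropWhile (fun w => w == "x")) := by
  induction l with
  | nil => intro cur h; simp [gcbRuns, h]
  | cons v rest ih =>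
    intro cur h
    by_cases hv : v == "x"
    · simp only [gcbRuns, hv, if_pos, List.takeWhile_cons, List.dropWhile_cons]
      rw [ih (cur + 1) (by omega)]
      simp
      ring_nf
    · simp only [gcbRuns, hv, Bool.false_eq_true, if_false, h, if_pos,
        List.takeWhile_cons, List.dropWhile_cons]
      simp

lemma gcbRuns_eq_spec (n : Nat) : ∀ (l : List String), l.length ≤ n →
    gcbRuns 0 l = gcbSpec l := by
  induction n with
  | zero =>
    intro l hl
    rw [List.length_eq_zero_iff.mp (Nat.le_zero.mp hl)]
    simp [gcbRuns, gcbSpec]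
  | succ n ih =>
    intro l hl
    match l with
    | [] => simp [gcbRuns, gcbSpec]
    | v :: rest =>
      simp only [List.length_cons, Nat.succ_le_succ_iff] at hl
      rw [gcbSpec]
      by_cases hv : v == "x"
      · rw [if_pos hv]
        simp only [gcbRuns, hv, if_pos]
        rw [show (0:Int) + 1 = 1 from rfl, gcbRuns_pos rest 1 (by omega)]
        rw [ih _ (le_trans (List.length_dropWhile_le _ _) hl)]
      · rw [if_neg hv]
        simp only [gcbRuns, hv, Bool.false_eq_true, if_false,
          show ¬ (0:Int) > 0 by omega, if_false, List.nil_append]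
        exact ih _ hl

---------------- B side ----------------

-- Recursive characterisations of the two filtered index lists.
def sRec (prevX : Bool) : List String → List Nat
  | [] => []
  | v :: rest =>
    (if v == "x" && !prevX then [0] else []) ++ (sRec (v == "x") rest).map (· + 1)

def eRec : List String → List Nat
  | [] => []
  | v :: rest =>
    (if v == "x" && !(rest.headD "" == "x") then [0] else []) ++ (eRec rest).map (· + 1)

def sPred (l : List String) (prevX : Bool) (i : Nat) : Bool :=
  (l.getD i "" == "x") && (if i = 0 then !prevX else !(l.getD (i - 1) "" == "x"))

def ePred (l : List String) (i : Nat) : Bool :=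
  (l.getD i "" == "x") && (decide (i + 1 = l.length) || !(l.getD (i + 1) "" == "x"))

lemma sFilt : ∀ (l : List String) (prevX : Bool),
    (List.range l.length).filter (sPred l prevX) = sRec prevX l := by
  intro l
  induction l with
  | nil => intro _; rfl
  | cons v rest ih =>
    intro prevX
    rw [List.length_cons, List.range_succ_eq_map, List.filter_cons, List.filter_map]
    have hmap : (List.range rest.length).filter (sPred (v :: rest) prevX ∘ Nat.succ)
        = (List.range rest.length).filter (sPred rest (v == "x")) := by
      apply List.filter_congr
      intro i _
      simp only [Function.comp, sPred, Nat.succ_ne_zero, if_false, Nat.succ_sub_one]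
      cases i with
      | zero => simp
      | succ j => simp
    have h0 : sPred (v :: rest) prevX 0 = (v == "x" && !prevX) := by
      simp [sPred]
    rw [hmap, ih]
    by_cases hv : (v == "x" && !prevX) = true
    · simp only [h0, hv, if_pos]
      rw [sRec]
      simp only [hv, if_pos, List.singleton_append]
    · simp only [h0, hv, Bool.false_eq_true, if_false]
      rw [sRec]
      simp [hv]

lemma eFilt : ∀ (l : List String),
    (List.range l.length).filter (ePred l) = eRec l := by
  intro l
  induction l with
  | nil => rfl
  | cons v rest ih =>
    rw [List.length_cons, List.range_succ_eq_map, List.filter_cons, List.filter_map]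
    have hmap : (List.range rest.length).filter (ePred (v :: rest) ∘ Nat.succ)
        = (List.range rest.length).filter (ePred rest) := by
      apply List.filter_congr
      intro i _
      simp only [Function.comp, ePred, List.length_cons, List.getD_cons_succ]
      congr 1
      congr 1
      simp [Nat.succ_eq_add_one]
    have h0 : ePred (v :: rest) 0 = (v == "x" && !(rest.headD "" == "x")) := by
      simp only [ePred, List.getD_cons_zero, List.length_cons, List.getD_cons_succ]
      cases rest with
      | nil => simp
      | cons w rs => simp
    rw [hmap, ih]
    by_cases hv : (v == "x" && !(rest.headD "" == "x")) = true
    · simp only [h0, hv, if_pos]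
      rw [eRec]
      simp only [hv, if_pos, List.singleton_append]
    · have hv' : (v == "x" && !(rest.headD "" == "x")) = false := Bool.eq_false_iff.mpr hv
      simp only [h0, hv', Bool.false_eq_true, if_false]
      rw [eRec]
      simp only [hv', Bool.false_eq_true, if_false, List.nil_append]

-- the port's two comprehensions are exactly sPred false / ePred
lemma alt_eq (values : List String) :
    get_connected_blocks_alt values
      = List.zipWith (fun (s e : Nat) => (e : Int) - (s : Int) + 1)
          (sRec false values) (eRec values) := by
  rw [← sFilt values false, ← eFilt values]
  show List.zipWith (fun (s e : Nat) => (e : Int) - (s : Int) + 1) _ _ = _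
  congr 1
  · apply List.filter_congr
    intro i _
    simp only [sPred]
    cases i with
    | zero => simp
    | succ j => simp
  · apply List.filter_congr
    intro i hi
    have hi' : i < values.length := List.mem_range.mp hi
    simp only [ePred]
    congr 1
    congr 1
    simp only [decide_eq_decide]
    omega

-- shifting both index lists by the same amount does not change the lengths
lemma zipWith_shift (c : Nat) : ∀ (a b : List Nat),
    List.zipWith (fun (s e : Nat) => (e : Int) - (s : Int) + 1) (a.map (· + c)) (b.map (· + c))
      = List.zipWith (fun (s e : Nat) => (e : Int) - (s : Int) + 1) a b := by
  intro a
  induction a with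
  | nil => intro b; simp
  | cons s a ih =>
    intro b
    cases b with
    | nil => simp
    | cons e b =>
      simp only [List.map_cons, List.zipWith_cons_cons, ih]
      congr 1
      push_cast
      ring

lemma map_add_one_add (c : Nat) (l : List Nat) :
    (l.map (· + c)).map (· + 1) = l.map (· + (c + 1)) := by
  rw [List.map_map]
  apply List.map_congr_left
  intro a _
  simp [Function.comp]
  omega

-- after a finished run (d empty or starting with a non-"x"), prevX is irrelevant
lemma sRec_true_eq_false (d : List String) (hd : ¬ (d.headD "" == "x") = true) :
    sRec true d = sRec false d := by
  cases d with
  | nil => rfl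
  | cons w rs =>
    simp only [List.headD_cons] at hd
    simp [sRec, hd]

lemma sRec_run : ∀ (t : List String), (∀ w ∈ t, w = "x") →
    ∀ (d : List String), ¬ (d.headD "" == "x") = true →
    sRec true (t ++ d) = (sRec false d).map (· + t.length) := by
  intro t
  induction t with
  | nil =>
    intro _ d hd
    rw [List.nil_append, sRec_true_eq_false d hd]
    simp
  | cons v t ih =>
    intro ht d hd
    have hv : v = "x" := ht v (List.mem_cons_self ..)
    subst hv
    rw [List.cons_append, sRec]
    simp only [beq_self_eq_true, Bool.not_true, Bool.and_false, Bool.false_eq_true,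
      if_false]
    rw [ih (fun w hw => ht w (List.mem_cons_of_mem _ hw)) d hd]
    rw [map_add_one_add]
    simp [List.length_cons]

lemma sRec_x_run (t : List String) (ht : ∀ w ∈ t, w = "x")
    (d : List String) (hd : ¬ (d.headD "" == "x") = true) :
    sRec false ("x" :: (t ++ d)) = 0 :: (sRec false d).map (· + (t.length + 1)) := by
  rw [sRec]
  simp only [beq_self_eq_true, Bool.not_false, Bool.and_true, if_pos, List.singleton_append]
  rw [sRec_run t ht d hd, map_add_one_add]

lemma eRec_x_run : ∀ (t : List String), (∀ w ∈ t, w = "x") →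
    ∀ (d : List String), ¬ (d.headD "" == "x") = true →
    eRec ("x" :: (t ++ d)) = t.length :: (eRec d).map (· + (t.length + 1)) := by
  intro t
  induction t with
  | nil =>
    intro _ d hd
    rw [List.nil_append, eRec]
    have hd2 : ¬ (d.head?.getD "" = "x") := by
      cases d with
      | nil => simp
      | cons w rs => simpa using hd
    simp [hd2]
  | cons v t ih =>
    intro ht d hd
    have hv : v = "x" := ht v (List.mem_cons_self ..)
    subst hv
    rw [eRec]
    simp only [List.cons_append, List.headD_cons, beq_self_eq_true, Bool.not_true,
      Bool.and_false, Bool.false_eq_true, if_false]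
    rw [ih (fun w hw => ht w (List.mem_cons_of_mem _ hw)) d hd]
    simp only [List.map_cons, map_add_one_add, List.length_cons]
    rfl

lemma bEqSpec (n : Nat) : ∀ (l : List String), l.length ≤ n →
    List.zipWith (fun (s e : Nat) => (e : Int) - (s : Int) + 1) (sRec false l) (eRec l)
      = gcbSpec l := by
  induction n with
  | zero =>
    intro l hl
    rw [List.length_eq_zero_iff.mp (Nat.le_zero.mp hl)]
    simp [sRec, eRec, gcbSpec]
  | succ n ih =>
    intro l hl
    match l with
    | [] => simp [sRec, eRec, gcbSpec]
    | v :: rest =>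
      simp only [List.length_cons, Nat.succ_le_succ_iff] at hl
      by_cases hv : (v == "x") = true
      · have hv' : v = "x" := by simpa using hv
        subst hv'
        set t := rest.takeWhile (fun w => w == "x") with hts
        set d := rest.dropWhile (fun w => w == "x") with hds
        have hrest : rest = t ++ d := (List.takeWhile_append_dropWhile ..).symm
        have ht : ∀ w ∈ t, w = "x" := by
          intro w hw
          have := List.mem_takeWhile_imp hw
          simpa using this
        have hd : ¬ (d.headD "" == "x") = true := by
          cases hdd : d with
          | nil => simp
          | cons w rs =>
            have := List.head_dropWhile_not (fun w => w == "x") (l := rest)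
            rw [← hds, hdd] at this
            simp only [List.headD_cons]
            simpa using this (by simp)
        conv_lhs => rw [hrest]
        rw [sRec_x_run t ht d hd, eRec_x_run t ht d hd, List.zipWith_cons_cons,
          zipWith_shift]
        rw [gcbSpec]
        simp only [beq_self_eq_true, if_pos, ← hts, ← hds]
        have hdlen : d.length ≤ n := le_trans (List.length_dropWhile_le _ _) hl
        rw [ih d hdlen]
        congr 1
        push_cast
        ring
      · rw [gcbSpec, if_neg hv]
        have hs : sRec false (v :: rest) = (sRec false rest).map (· + 1) := by
          rw [sRec]
          simp [hv]
        have he : eRec (v :: rest) = (eRec rest).map (· + 1) := by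
          rw [eRec]
          simp [hv]
        rw [hs, he]
        have := zipWith_shift 1 (sRec false rest) (eRec rest)
        simp only at this
        rw [this]
        exact ih rest hl

-- ===== VERDICT (by name: the statement is the Claim_ definition above) =====
theorem get_connected_blocks_spec : Claim_equal_get_connected_blocks := by
  intro values _
  unfold Spec_get_connected_blocks
  rw [alt_eq, bEqSpec values.length values (le_refl _)]
  rw [get_connected_blocks_eq, gcbRuns_foldl values [] 0, List.nil_append,
    gcbRuns_eq_spec values.length values (le_refl _)]
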